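-- pv_equiv track=rewrite | github.com/h-hadi/DocAI-Public | config.py | get_provider_for_model
-- ===== SOURCE A (Python) =====
-- PROVIDERS = {
--     "openai": {
--         "models": ["gpt-4o", "gpt-4.1-mini", "gpt-5-mini", "o3-mini"],
--         "base_url": "https://api.openai.com/v1",
--         "env_key": "OPENAI_API_KEY",
--     },
--     "anthropic": {
--         "models": ["claude-sonnet-4-6", "claude-haiku-4-5", "claude-opus-4-6"],
--         "base_url": "https://api.anthropic.com/v1",
--         "env_key": "ANTHROPIC_API_KEY",
--     },
--     "google": {
--         "models": ["gemini-2.5-pro", "gemini-2.5-flash"],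
--         "base_url": "https://generativelanguage.googleapis.com/v1beta/openai",
--         "env_key": "GOOGLE_API_KEY",
--     },
-- }
--
-- def get_provider_for_model(model: str) -> dict | None:
--     """Return provider config dict for a given model name."""
--     for provider_name, provider_info in PROVIDERS.items():
--         if model in provider_info["models"]:
--             return {
--                 "name": provider_name,
--                 "base_url": provider_info["base_url"],
--                 "env_key": provider_info["env_key"],
--             }
--     return None
-- ===== SOURCE B (Python) =====
-- PROVIDERS = {
--     "openai": {
--         "models": ["gpt-4o", "gpt-4.1-mini", "gpt-5-mini", "o3-mini"],
--         "base_url": "https://api.openai.com/v1",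
--         "env_key": "OPENAI_API_KEY",
--     },
--     "anthropic": {
--         "models": ["claude-sonnet-4-6", "claude-haiku-4-5", "claude-opus-4-6"],
--         "base_url": "https://api.anthropic.com/v1",
--         "env_key": "ANTHROPIC_API_KEY",
--     },
--     "google": {
--         "models": ["gemini-2.5-pro", "gemini-2.5-flash"],
--         "base_url": "https://generativelanguage.googleapis.com/v1beta/openai",
--         "env_key": "GOOGLE_API_KEY",
--     },
-- }
--
-- # Inverted index built once: model name -> provider name.
-- MODEL_TO_PROVIDER = {
--     m: name for name, info in PROVIDERS.items() for m in info["models"]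
-- }
--
-- def get_provider_for_model(model: str) -> dict | None:
--     """Return provider config dict for a given model name."""
--     provider_name = MODEL_TO_PROVIDER.get(model)
--     if provider_name is None:
--         return None
--     info = PROVIDERS[provider_name]
--     return {
--         "name": provider_name,
--         "base_url": info["base_url"],
--         "env_key": info["env_key"],
--     }
-- ===== Notes on version B (the rewrite author's own statement) =====
-- stated objective: idiomatic
-- what changed: Replaces the per-provider scan with list membership tests by a module-level inverted index (model -> provider name) built once, so the function is a single dict lookup plus a fresh result-dict assembly.
import Mathlib
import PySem

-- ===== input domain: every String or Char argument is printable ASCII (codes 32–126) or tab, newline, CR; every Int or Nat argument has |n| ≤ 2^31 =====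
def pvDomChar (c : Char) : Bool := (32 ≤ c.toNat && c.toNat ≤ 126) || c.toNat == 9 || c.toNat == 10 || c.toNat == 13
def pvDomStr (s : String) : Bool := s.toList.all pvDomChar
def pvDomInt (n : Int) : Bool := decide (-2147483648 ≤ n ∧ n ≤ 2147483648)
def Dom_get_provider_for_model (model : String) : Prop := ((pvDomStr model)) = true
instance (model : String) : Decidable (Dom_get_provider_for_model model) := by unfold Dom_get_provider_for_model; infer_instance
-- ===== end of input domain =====

-- B replaces A's per-provider scan with a precomputed inverted index (model -> provider), making the lookup a single table probe (idiomatic).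


-- ===== PORT A =====
-- PROVIDERS: name -> (models, base_url, env_key)
def PROVIDERS : List (String × (List String × String × String)) :=
  [ ("openai", (["gpt-4o", "gpt-4.1-mini", "gpt-5-mini", "o3-mini"],
       "https://api.openai.com/v1", "OPENAI_API_KEY")),
    ("anthropic", (["claude-sonnet-4-6", "claude-haiku-4-5", "claude-opus-4-6"],
       "https://api.anthropic.com/v1", "ANTHROPIC_API_KEY")),
    ("google", (["gemini-2.5-pro", "gemini-2.5-flash"],
       "https://generativelanguage.googleapis.com/v1beta/openai", "GOOGLE_API_KEY")) ]

-- the for-loop over PROVIDERS.items() with early return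
def pvScan (model : String) : List (String × (List String × String × String)) → Option (List (String × String))
  | [] => none
  | (provider_name, provider_info) :: rest =>
      if provider_info.1.contains model then
        some [("name", provider_name),
              ("base_url", provider_info.2.1),
              ("env_key", provider_info.2.2)]
      else pvScan model rest

def get_provider_for_model (model : String) : Option (List (String × String)) :=
  pvScan model PROVIDERS

-- ===== PORT B =====
-- inverted index built once from PROVIDERS (the dict comprehension in Source B)
def MODEL_TO_PROVIDER : PySem.Dict String String :=
  PROVIDERS.foldl (fun d p => p.2.1.foldl (fun d m => PySem.Dict.insert d m p.1) d) PySem.Dict.empty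

def get_provider_for_model_alt (model : String) : Option (List (String × String)) :=
  match PySem.Dict.get? MODEL_TO_PROVIDER model with
  | none => none
  | some provider_name =>
      match PySem.Dict.get? (PySem.Dict.mk PROVIDERS) provider_name with
      | none => none  -- unreachable: index values are PROVIDERS keys (Python would raise KeyError)
      | some info =>
          some [("name", provider_name),
                ("base_url", info.2.1),
                ("env_key", info.2.2)]

-- ===== PRECONDITION & SPEC =====
def Spec_get_provider_for_model (model : String) (out : Option (List (String × String))) : Prop := out = get_provider_for_model_alt model
instance (model : String) (out : Option (List (String × String))) : Decidable (Spec_get_provider_for_model model out) := by unfold Spec_get_provider_for_model; infer_instance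

-- ===== CLAIM (what is proved, stated in full; the proofs are below) =====
def Claim_equal_get_provider_for_model : Prop := ∀ (model : String), Dom_get_provider_for_model model → Spec_get_provider_for_model model (get_provider_for_model model)

-- ===== LEMMAS AND PROOFS =====

-- ===== VERDICT (by name: the statement is the Claim_ definition above) =====
theorem get_provider_for_model_spec : Claim_equal_get_provider_for_model := by
  intro model _
  unfold Spec_get_provider_for_model
  by_cases h0 : model = "gpt-4o"
  · subst h0; decide
  by_cases h1 : model = "gpt-4.1-mini"
  · subst h1; decide
  by_cases h2 : model = "gpt-5-mini"
  · subst h2; decide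
  by_cases h3 : model = "o3-mini"
  · subst h3; decide
  by_cases h4 : model = "claude-sonnet-4-6"
  · subst h4; decide
  by_cases h5 : model = "claude-haiku-4-5"
  · subst h5; decide
  by_cases h6 : model = "claude-opus-4-6"
  · subst h6; decide
  by_cases h7 : model = "gemini-2.5-pro"
  · subst h7; decide
  by_cases h8 : model = "gemini-2.5-flash"
  · subst h8; decide
  simp [get_provider_for_model, get_provider_for_model_alt, pvScan, PROVIDERS,
    MODEL_TO_PROVIDER, PySem.Dict.insert, PySem.Dict.empty, PySem.Dict.get?,
    PySem.Dict.mk, h0, h1, h2, h3, h4, h5, h6, h7, h8, Ne.symm h0, Ne.symm h1, Ne.symm h2, Ne.symm h3, Ne.symm h4, Ne.symm h5, Ne.symm h6, Ne.symm h7, Ne.symm h8]
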